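-- pv_equiv track=rewrite | github.com/jskim7018/leetcode_study | algorithm_study/2026/01/20260129/medium/LC_3755.py | maxBalancedSubarray
-- ===== SOURCE A (Python) =====
-- from typing import List
--
-- def maxBalancedSubarray(nums: List[int]) -> int:
--     curr_even = 0
--     curr_odd = 0
--     left_most_xor = dict()
--     left_most_xor[(0,0)] = -1
--
--     n = len(nums)
--     curr_xor = 0
--     ans = 0
--     for i in range(n):
--         curr_xor ^= nums[i]
--         if nums[i] % 2 == 0:
--             curr_even += 1
--         else:
--             curr_odd += 1
--         key = (curr_xor, curr_even-curr_odd)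
--         if key in left_most_xor:
--             left = left_most_xor[key] + 1
--             ans = max(ans, i - left + 1)
--         else:
--             left_most_xor[key] = i
--
--     return ans
-- ===== SOURCE B (Python) =====
-- from typing import List
--
-- def maxBalancedSubarray(nums: List[int]) -> int:
--     n = len(nums)
--     ans = 0
--     for i in range(n):
--         x = 0
--         bal = 0
--         for j in range(i, n):
--             x ^= nums[j]
--             bal += 1 if nums[j] % 2 == 0 else -1
--             if x == 0 and bal == 0:
--                 ans = max(ans, j - i + 1)
--     return ans
-- ===== Notes on version B (the rewrite author's own statement) =====
-- stated objective: alternative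
-- what changed: Replaces A's single-pass prefix-state hashmap (first occurrence of each (xor, even-odd) key) with a direct brute-force double loop that, for each start index, maintains a running xor and even/odd balance while advancing the end index and checks the balance condition on each subarray explicitly.
import Mathlib
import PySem

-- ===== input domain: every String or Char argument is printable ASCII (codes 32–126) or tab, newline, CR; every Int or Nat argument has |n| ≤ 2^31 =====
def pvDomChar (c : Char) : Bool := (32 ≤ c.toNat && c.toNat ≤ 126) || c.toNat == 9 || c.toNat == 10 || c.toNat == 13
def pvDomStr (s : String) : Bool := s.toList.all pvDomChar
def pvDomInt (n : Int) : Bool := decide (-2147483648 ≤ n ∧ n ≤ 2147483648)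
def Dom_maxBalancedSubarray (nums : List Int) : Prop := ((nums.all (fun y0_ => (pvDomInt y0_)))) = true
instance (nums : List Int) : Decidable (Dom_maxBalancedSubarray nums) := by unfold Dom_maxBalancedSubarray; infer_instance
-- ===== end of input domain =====

-- B replaces A's one-pass prefix-state hashmap with a direct brute-force scan of all
-- subarrays (running xor and even/odd balance from each start index); alternative
-- decomposition, not faster.

-- ===== PORT A =====
-- loop body of A: state = (curr_even, curr_odd, curr_xor, ans, left_most_xor)
def maxBalancedSubarrayStep (nums : List Int)
    (st : Int × Int × Int × Int × PySem.Dict (Int × Int) Int) (i : Int) :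
    Int × Int × Int × Int × PySem.Dict (Int × Int) Int :=
  let v := PySem.List.pyGetD nums i 0          -- nums[i], i always in range
  let cx := PySem.Int.bxor st.2.2.1 v          -- curr_xor ^= nums[i]
  let ce := if PySem.Int.mod v 2 = 0 then st.1 + 1 else st.1
  let co := if PySem.Int.mod v 2 = 0 then st.2.1 else st.2.1 + 1
  let key := (cx, ce - co)
  match st.2.2.2.2.get? key with
  | some lm => (ce, co, cx, max st.2.2.2.1 (i - (lm + 1) + 1), st.2.2.2.2)
  | none    => (ce, co, cx, st.2.2.2.1, st.2.2.2.2.insert key i)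

def maxBalancedSubarray (nums : List Int) : Int :=
  ((PySem.List.pyRange 0 (PySem.List.len nums) 1).foldl (maxBalancedSubarrayStep nums)
    (0, 0, 0, 0, (PySem.Dict.empty : PySem.Dict (Int × Int) Int).insert (0, 0) (-1))).2.2.2.1

-- ===== PORT B =====
-- inner-loop body of B: state = (x, bal, ans)
def maxBalancedSubarrayInnerStep (nums : List Int) (i : Int)
    (st : Int × Int × Int) (j : Int) : Int × Int × Int :=
  let v := PySem.List.pyGetD nums j 0          -- nums[j], j always in range
  let x := PySem.Int.bxor st.1 v
  let bal := st.2.1 + (if PySem.Int.mod v 2 = 0 then 1 else -1)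
  if x = 0 ∧ bal = 0 then (x, bal, max st.2.2 (j - i + 1)) else (x, bal, st.2.2)

def maxBalancedSubarray_alt (nums : List Int) : Int :=
  let n := PySem.List.len nums
  (PySem.List.pyRange 0 n 1).foldl
    (fun ans i => ((PySem.List.pyRange i n 1).foldl (maxBalancedSubarrayInnerStep nums i) (0, 0, ans)).2.2) 0

-- ===== PRECONDITION & SPEC =====
def Spec_maxBalancedSubarray (nums : List Int) (out : Int) : Prop := out = maxBalancedSubarray_alt nums
instance (nums : List Int) (out : Int) : Decidable (Spec_maxBalancedSubarray nums out) := by unfold Spec_maxBalancedSubarray; infer_instance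

-- ===== CLAIM (what is proved, stated in full; the proofs are below) =====
def Claim_equal_maxBalancedSubarray : Prop := ∀ (nums : List Int), Dom_maxBalancedSubarray nums → Spec_maxBalancedSubarray nums (maxBalancedSubarray nums)

-- ===== LEMMAS AND PROOFS =====

-- Python-exact xor on the four sign patterns
theorem pvBxor_ns (m n : Nat) : PySem.Int.bxor (↑m) (Int.negSucc n) = Int.negSucc (m ^^^ n) := by
  simp [PySem.Int.bxor, Int.negSucc_eq]
  omega

theorem pvBxor_sn (m n : Nat) : PySem.Int.bxor (Int.negSucc m) (↑n) = Int.negSucc (m ^^^ n) := by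
  simp [PySem.Int.bxor, Int.negSucc_eq]
  omega

theorem pvBxor_ss (m n : Nat) : PySem.Int.bxor (Int.negSucc m) (Int.negSucc n) = ↑(m ^^^ n) := by
  simp [PySem.Int.bxor, Int.negSucc_eq]
  omega

theorem pvBxor_assoc (a b c : Int) :
    PySem.Int.bxor (PySem.Int.bxor a b) c = PySem.Int.bxor a (PySem.Int.bxor b c) := by
  cases a with
  | ofNat m => cases b with
    | ofNat n => cases c with
      | ofNat k => simp [Int.ofNat_eq_natCast, Nat.xor_assoc]
      | negSucc k => simp [Int.ofNat_eq_natCast, pvBxor_ns, Nat.xor_assoc]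
    | negSucc n => cases c with
      | ofNat k => simp [Int.ofNat_eq_natCast, pvBxor_ns, pvBxor_sn, Nat.xor_assoc]
      | negSucc k => simp [Int.ofNat_eq_natCast, pvBxor_ns, pvBxor_ss, Nat.xor_assoc]
  | negSucc m => cases b with
    | ofNat n => cases c with
      | ofNat k => simp [Int.ofNat_eq_natCast, pvBxor_sn, Nat.xor_assoc]
      | negSucc k => simp [Int.ofNat_eq_natCast, pvBxor_ns, pvBxor_sn, pvBxor_ss, Nat.xor_assoc]
    | negSucc n => cases c with
      | ofNat k => simp [Int.ofNat_eq_natCast, pvBxor_sn, pvBxor_ss, Nat.xor_assoc]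
      | negSucc k => simp [pvBxor_ns, pvBxor_sn, pvBxor_ss, Nat.xor_assoc]

theorem pvBxor_zero_left (a : Int) : PySem.Int.bxor 0 a = a := by
  rw [PySem.Int.bxor_comm]; exact PySem.Int.bxor_zero a

theorem pvBxor_eq_zero_iff (a b : Int) : PySem.Int.bxor a b = 0 ↔ a = b := by
  constructor
  · intro h
    have h1 : PySem.Int.bxor a (PySem.Int.bxor a b) = a := by
      rw [h]; exact PySem.Int.bxor_zero a
    rw [← pvBxor_assoc, PySem.Int.bxor_self, pvBxor_zero_left] at h1
    exact h1.symm
  · intro h; rw [h]; exact PySem.Int.bxor_self b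

-- prefix xor / prefix balance of the first m elements
def pvStepB (b v : Int) : Int := b + (if PySem.Int.mod v 2 = 0 then 1 else -1)
def pvX (nums : List Int) (m : Nat) : Int := (nums.take m).foldl PySem.Int.bxor 0
def pvB (nums : List Int) (m : Nat) : Int := (nums.take m).foldl pvStepB 0
def pvStt (nums : List Int) (m : Nat) : Int × Int := (pvX nums m, pvB nums m)

theorem pv_getD (nums : List Int) (m : Nat) (h : m < nums.length) :
    PySem.List.pyGetD nums (↑m) 0 = nums[m] := by
  simp [PySem.List.pyGetD_natCast, List.getD_eq_getElem?_getD, List.getElem?_eq_getElem h]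

theorem pv_take_succ (nums : List Int) (m : Nat) (h : m < nums.length) :
    nums.take (m + 1) = nums.take m ++ [nums[m]] := by
  rw [List.take_add_one, List.getElem?_eq_getElem h]
  rfl

theorem pvX_succ (nums : List Int) (m : Nat) (h : m < nums.length) :
    pvX nums (m + 1) = PySem.Int.bxor (pvX nums m) nums[m] := by
  unfold pvX
  rw [pv_take_succ nums m h, List.foldl_append]
  rfl

theorem pvB_succ (nums : List Int) (m : Nat) (h : m < nums.length) :
    pvB nums (m + 1) = pvStepB (pvB nums m) nums[m] := by
  unfold pvB
  rw [pv_take_succ nums m h, List.foldl_append]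
  rfl

theorem pvExists_min {P : Nat → Prop} [DecidablePred P] (h : ∃ k, P k) :
    ∃ k, P k ∧ ∀ k', k' < k → ¬ P k' :=
  ⟨Nat.find h, Nat.find_spec h, fun _ hk' => Nat.find_min h hk'⟩

theorem pv_foldl_cast {β : Type} (n : Nat) (f : β → Int → β) (init : β) :
    (PySem.List.pyRange 0 (↑n) 1).foldl f init = (List.range n).foldl (fun s (k : Nat) => f s (↑k : Int)) init := by
  rw [PySem.List.pyRange_zero_natCast]
  induction (List.range n) generalizing init <;> simp_all

-- ------- A side -------
def pvAState (nums : List Int) (m : Nat) : Int × Int × Int × Int × PySem.Dict (Int × Int) Int :=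
  (List.range m).foldl (fun st (k : Nat) => maxBalancedSubarrayStep nums st (↑k : Int))
    (0, 0, 0, 0, (PySem.Dict.empty : PySem.Dict (Int × Int) Int).insert (0, 0) (-1))

def pvDictInv (nums : List Int) (m : Nat) (d : PySem.Dict (Int × Int) Int) : Prop :=
  ∀ s v, d.get? s = some v ↔
    ∃ k, k ≤ m ∧ pvStt nums k = s ∧ (∀ k', k' < k → pvStt nums k' ≠ s) ∧ v = (k : Int) - 1

def pvAnsInv (nums : List Int) (m : Nat) (ans : Int) : Prop :=
  0 ≤ ans ∧
  (∀ p q : Nat, p < q → q ≤ m → pvStt nums p = pvStt nums q → (q : Int) - p ≤ ans) ∧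
  (ans = 0 ∨ ∃ p q : Nat, p < q ∧ q ≤ m ∧ pvStt nums p = pvStt nums q ∧ ans = (q : Int) - p)

-- shared step case of the A-side invariant (both parity branches)
theorem pvA_step_core (nums : List Int) (m : Nat)
    (ce' co' ans : Int) (d : PySem.Dict (Int × Int) Int)
    (hdk : ce' - co' = pvB nums (m + 1))
    (ihD : ∀ (s : Int × Int) (v : Int), d.get? s = some v ↔
      ∃ k, k ≤ m ∧ pvStt nums k = s ∧ (∀ k', k' < k → pvStt nums k' ≠ s) ∧ v = (k : Int) - 1)
    (ihA0 : 0 ≤ ans)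
    (ihA5 : ∀ p q : Nat, p < q → q ≤ m → pvStt nums p = pvStt nums q → (q : Int) - p ≤ ans)
    (ihA6 : ans = 0 ∨ ∃ p q : Nat, p < q ∧ q ≤ m ∧ pvStt nums p = pvStt nums q ∧
        ans = (q : Int) - p) :
    (fun st =>
      st.1 - st.2.1 = pvB nums (m + 1) ∧
      st.2.2.1 = pvX nums (m + 1) ∧
      (∀ (s : Int × Int) (v : Int), st.2.2.2.2.get? s = some v ↔
        ∃ k, k ≤ m + 1 ∧ pvStt nums k = s ∧ (∀ k', k' < k → pvStt nums k' ≠ s) ∧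
          v = (k : Int) - 1) ∧
      0 ≤ st.2.2.2.1 ∧
      (∀ p q : Nat, p < q → q ≤ m + 1 → pvStt nums p = pvStt nums q →
          (q : Int) - p ≤ st.2.2.2.1) ∧
      (st.2.2.2.1 = 0 ∨ ∃ p q : Nat, p < q ∧ q ≤ m + 1 ∧ pvStt nums p = pvStt nums q ∧
          st.2.2.2.1 = (q : Int) - p))
    (match d.get? (pvX nums (m + 1), pvB nums (m + 1)) with
      | some lm => (ce', co', pvX nums (m + 1), max ans ((↑m : Int) - (lm + 1) + 1), d)
      | none => (ce', co', pvX nums (m + 1), ans,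
          d.insert (pvX nums (m + 1), pvB nums (m + 1)) (↑m : Int))) := by
  have hsttm1 : pvStt nums (m + 1) = (pvX nums (m + 1), pvB nums (m + 1)) := rfl
  rcases hg : d.get? (pvX nums (m + 1), pvB nums (m + 1)) with _ | lm
  · -- key not present: insert, answer unchanged
    have hnone : ∀ k, k ≤ m → pvStt nums k ≠ (pvX nums (m + 1), pvB nums (m + 1)) := by
      intro k hk hstt
      obtain ⟨k0, ⟨hk0m, hk0s⟩, hk0min⟩ := pvExists_min
        (P := fun k => k ≤ m ∧ pvStt nums k = (pvX nums (m + 1), pvB nums (m + 1)))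
        ⟨k, hk, hstt⟩
      have hsome : d.get? (pvX nums (m + 1), pvB nums (m + 1)) = some ((k0 : Int) - 1) := by
        refine (ihD _ _).mpr ⟨k0, hk0m, hk0s, ?_, rfl⟩
        intro k' hk' hx
        exact hk0min k' hk' ⟨by omega, hx⟩
      rw [hg] at hsome
      cases hsome
    refine ⟨hdk, rfl, ?_, ihA0, ?_, ?_⟩
    · intro s v
      rw [PySem.Dict.get?_insert]
      by_cases hs : s = (pvX nums (m + 1), pvB nums (m + 1))
      · rw [if_pos hs]
        constructor
        · intro hv
          simp only [Option.some.injEq] at hv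
          refine ⟨m + 1, le_rfl, hsttm1.trans hs.symm, ?_, by push_cast; omega⟩
          intro k' hk' hx
          exact hnone k' (by omega) (hx.trans hs)
        · rintro ⟨k, hk, hstt, hmin, hv⟩
          have hkm : k = m + 1 := by
            by_contra hne
            exact hnone k (by omega) (hstt.trans hs)
          subst hkm
          simp only [Option.some.injEq]
          push_cast at hv
          omega
      · rw [if_neg hs]
        constructor
        · intro hgg
          obtain ⟨k, hk, r1, r2, r3⟩ := (ihD s v).mp hgg
          exact ⟨k, by omega, r1, r2, r3⟩
        · rintro ⟨k, hk, hstt, hmin, hv⟩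
          refine (ihD s v).mpr ⟨k, ?_, hstt, hmin, hv⟩
          have : k ≠ m + 1 := by
            intro he
            subst he
            exact hs (hstt.symm.trans hsttm1)
          omega
    · intro p q hpq hq hs
      by_cases hqm : q ≤ m
      · exact ihA5 p q hpq hqm hs
      · have hq1 : q = m + 1 := by omega
        subst hq1
        exact absurd (hs.trans hsttm1) (hnone p (by omega))
    · rcases ihA6 with h0 | ⟨p, q, a, b, c, dd⟩
      · exact Or.inl h0
      · exact Or.inr ⟨p, q, a, by omega, c, dd⟩
  · -- key present: answer update, dict unchanged
    obtain ⟨k0, hk0m, hk0s, hk0min, hlm⟩ := (ihD _ _).mp hg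
    have hcand : (↑m : Int) - (lm + 1) + 1 = ((m + 1 : Nat) : Int) - (k0 : Int) := by
      rw [hlm]; push_cast; ring
    refine ⟨hdk, rfl, ?_, ihA0.trans (le_max_left _ _), ?_, ?_⟩
    · intro s v
      constructor
      · intro hgg
        obtain ⟨k, hk, r1, r2, r3⟩ := (ihD s v).mp hgg
        exact ⟨k, by omega, r1, r2, r3⟩
      · rintro ⟨k, hk, hstt, hmin, hv⟩
        refine (ihD s v).mpr ⟨k, ?_, hstt, hmin, hv⟩
        by_contra hkk
        have hk1 : k = m + 1 := by omega
        subst hk1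
        exact hmin k0 (by omega) (hk0s.trans (hsttm1.symm.trans hstt))
    · intro p q hpq hq hs
      by_cases hqm : q ≤ m
      · exact (ihA5 p q hpq hqm hs).trans (le_max_left _ _)
      · have hq1 : q = m + 1 := by omega
        subst hq1
        have hk0p : k0 ≤ p := by
          by_contra hlt
          exact hk0min p (by omega) (hs.trans hsttm1)
        have h1 : (↑m : Int) - (lm + 1) + 1 ≤ max ans ((↑m : Int) - (lm + 1) + 1) :=
          le_max_right _ _
        rw [hcand] at h1
        show ((m + 1 : Nat) : Int) - (p : Int) ≤ max ans ((↑m : Int) - (lm + 1) + 1)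
        push_cast at h1 ⊢
        omega
    · show max ans ((↑m : Int) - (lm + 1) + 1) = 0 ∨ ∃ p q : Nat, p < q ∧ q ≤ m + 1 ∧
          pvStt nums p = pvStt nums q ∧ max ans ((↑m : Int) - (lm + 1) + 1) = (q : Int) - (p : Int)
      rcases max_choice ans ((↑m : Int) - (lm + 1) + 1) with hmx | hmx <;> rw [hmx]
      · rcases ihA6 with h0 | ⟨p, q, a, b, c, dd⟩
        · exact Or.inl h0
        · exact Or.inr ⟨p, q, a, by omega, c, dd⟩
      · exact Or.inr ⟨k0, m + 1, by omega, le_rfl, hk0s.trans hsttm1.symm, hcand⟩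

theorem pvAState_succ (nums : List Int) (m : Nat) :
    pvAState nums (m + 1) = maxBalancedSubarrayStep nums (pvAState nums m) (↑m : Int) := by
  unfold pvAState
  rw [List.range_succ, List.foldl_append]
  rfl

theorem pvA_inv (nums : List Int) : ∀ m : Nat, m ≤ nums.length →
    (pvAState nums m).1 - (pvAState nums m).2.1 = pvB nums m ∧
    (pvAState nums m).2.2.1 = pvX nums m ∧
    (∀ (s : Int × Int) (v : Int), (pvAState nums m).2.2.2.2.get? s = some v ↔
      ∃ k, k ≤ m ∧ pvStt nums k = s ∧ (∀ k', k' < k → pvStt nums k' ≠ s) ∧ v = (k : Int) - 1) ∧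
    0 ≤ (pvAState nums m).2.2.2.1 ∧
    (∀ p q : Nat, p < q → q ≤ m → pvStt nums p = pvStt nums q →
        (q : Int) - p ≤ (pvAState nums m).2.2.2.1) ∧
    ((pvAState nums m).2.2.2.1 = 0 ∨ ∃ p q : Nat, p < q ∧ q ≤ m ∧
        pvStt nums p = pvStt nums q ∧ (pvAState nums m).2.2.2.1 = (q : Int) - p) := by
  intro m
  induction m with
  | zero =>
    intro _
    refine ⟨by simp [pvAState, pvB], by simp [pvAState, pvX], ?_, le_rfl, ?_, Or.inl rfl⟩
    · intro s v
      show ((PySem.Dict.empty : PySem.Dict (Int × Int) Int).insert (0, 0) (-1)).get? s = some v ↔ _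
      rw [PySem.Dict.get?_insert]
      constructor
      · intro hg
        by_cases hs : s = ((0 : Int), (0 : Int))
        · rw [if_pos hs] at hg
          refine ⟨0, le_rfl, by rw [hs]; rfl, ?_, ?_⟩
          · intro k' _; omega
          · simp only [Option.some.injEq] at hg; omega
        · rw [if_neg hs, PySem.Dict.get?_empty] at hg; cases hg
      · rintro ⟨k, hk, hstt, _, hv⟩
        have hk0 : k = 0 := by omega
        subst hk0
        have hs0 : s = ((0 : Int), (0 : Int)) := hstt.symm
        rw [if_pos hs0]
        simp only [Option.some.injEq]; omega
    · intro p q _ hq hp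
      exact absurd hq (by omega)
  | succ m ih =>
    intro hm
    have h : m < nums.length := by omega
    obtain ⟨ihB, ihX, ihD, ihA0, ihA5, ihA6⟩ := ih (by omega)
    rw [pvAState_succ]
    rcases hA : pvAState nums m with ⟨ce, co, cx, ans, d⟩
    rw [hA] at ihB ihX ihD ihA0 ihA5 ihA6
    simp only at ihB ihX ihD ihA0 ihA5 ihA6
    simp only [maxBalancedSubarrayStep, pv_getD nums m h]
    have hxkey : PySem.Int.bxor cx nums[m] = pvX nums (m + 1) := by
      rw [ihX]; exact (pvX_succ nums m h).symm
    rw [hxkey]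
    by_cases hpar : PySem.Int.mod nums[m] 2 = 0
    · rw [if_pos hpar, if_pos hpar]
      have hdk : ce + 1 - co = pvB nums (m + 1) := by
        rw [pvB_succ nums m h]; unfold pvStepB; rw [if_pos hpar]; omega
      rw [hdk]
      exact pvA_step_core nums m (ce + 1) co ans d hdk ihD ihA0 ihA5 ihA6
    · rw [if_neg hpar, if_neg hpar]
      have hdk : ce - (co + 1) = pvB nums (m + 1) := by
        rw [pvB_succ nums m h]; unfold pvStepB; rw [if_neg hpar]; omega
      rw [hdk]
      exact pvA_step_core nums m ce (co + 1) ans d hdk ihD ihA0 ihA5 ihA6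
theorem pvA_eq (nums : List Int) :
    maxBalancedSubarray nums = (pvAState nums nums.length).2.2.2.1 := by
  unfold maxBalancedSubarray pvAState
  rw [PySem.List.len_eq, pv_foldl_cast]

-- ------- B side -------
def pvBInner (nums : List Int) (i m : Nat) (ans0 : Int) : Int × Int × Int :=
  (PySem.List.pyRange (↑i) (↑m) 1).foldl (maxBalancedSubarrayInnerStep nums ↑i) (0, 0, ans0)

theorem pvB_inner_inv (nums : List Int) (i : Nat) : ∀ m : Nat, i ≤ m → m ≤ nums.length →
    ∀ ans0 : Int,
    (pvBInner nums i m ans0).1 = PySem.Int.bxor (pvX nums i) (pvX nums m) ∧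
    (pvBInner nums i m ans0).2.1 = pvB nums m - pvB nums i ∧
    ans0 ≤ (pvBInner nums i m ans0).2.2 ∧
    (∀ q : Nat, i < q → q ≤ m → pvStt nums q = pvStt nums i →
        (q : Int) - i ≤ (pvBInner nums i m ans0).2.2) ∧
    ((pvBInner nums i m ans0).2.2 = ans0 ∨
      ∃ q : Nat, i < q ∧ q ≤ m ∧ pvStt nums q = pvStt nums i ∧
        (pvBInner nums i m ans0).2.2 = (q : Int) - i) := by
  intro m hi
  induction m, hi using Nat.le_induction with
  | base =>
    intro _ ans0
    have hnil : PySem.List.pyRange (↑i : Int) (↑i : Int) 1 = [] := by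
      rw [List.eq_nil_iff_forall_not_mem]
      intro x hx
      rw [PySem.List.mem_pyRange_one] at hx
      omega
    unfold pvBInner
    rw [hnil]
    refine ⟨(PySem.Int.bxor_self _).symm, (sub_self _).symm, le_rfl, ?_, Or.inl rfl⟩
    intro q h1 h2 _
    omega
  | succ m hmi ih =>
    intro hm ans0
    obtain ⟨ihx, ihb, iha, ih5, ih6⟩ := ih (by omega) ans0
    have h : m < nums.length := by omega
    have hstep : pvBInner nums i (m + 1) ans0 =
        maxBalancedSubarrayInnerStep nums (↑i : Int) (pvBInner nums i m ans0) (↑m : Int) := by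
      unfold pvBInner
      have hc : ((m + 1 : Nat) : Int) = (↑m : Int) + 1 := by push_cast; ring
      rw [hc, PySem.List.pyRange_one_succ_right (by exact_mod_cast hmi), List.foldl_append]
      rfl
    rcases hst : pvBInner nums i m ans0 with ⟨x, bal, ans⟩
    rw [hst] at ihx ihb iha ih5 ih6
    simp only at ihx ihb iha ih5 ih6
    rw [hstep, hst]
    simp only [maxBalancedSubarrayInnerStep, pv_getD nums m h]
    have hx' : PySem.Int.bxor x nums[m] = PySem.Int.bxor (pvX nums i) (pvX nums (m + 1)) := by
      rw [ihx, pvBxor_assoc, ← pvX_succ nums m h]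
    have hb' : bal + (if PySem.Int.mod nums[m] 2 = 0 then 1 else -1) =
        pvB nums (m + 1) - pvB nums i := by
      rw [ihb, pvB_succ nums m h]; unfold pvStepB; ring
    have hcond : (PySem.Int.bxor x nums[m] = 0 ∧
        bal + (if PySem.Int.mod nums[m] 2 = 0 then 1 else -1) = 0) ↔
        pvStt nums (m + 1) = pvStt nums i := by
      rw [hx', hb']
      unfold pvStt
      rw [Prod.ext_iff]
      constructor
      · rintro ⟨h1, h2⟩
        exact ⟨((pvBxor_eq_zero_iff _ _).mp h1).symm, by omega⟩
      · rintro ⟨h1, h2⟩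
        exact ⟨(pvBxor_eq_zero_iff _ _).mpr h1.symm, by omega⟩
    have hval : (↑m : Int) - (↑i : Int) + 1 = ((m + 1 : Nat) : Int) - (↑i : Int) := by
      push_cast; ring
    by_cases hc : PySem.Int.bxor x nums[m] = 0 ∧
        bal + (if PySem.Int.mod nums[m] 2 = 0 then 1 else -1) = 0
    · rw [if_pos hc]
      refine ⟨hx', hb', iha.trans (le_max_left _ _), ?_, ?_⟩
      · intro q hq1 hq2 hs
        by_cases hqm : q ≤ m
        · exact (ih5 q hq1 hqm hs).trans (le_max_left _ _)
        · have hq3 : q = m + 1 := by omega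
          subst hq3
          show ((m + 1 : Nat) : Int) - (↑i : Int) ≤ max ans ((↑m : Int) - (↑i : Int) + 1)
          have h1 := le_max_right ans ((↑m : Int) - (↑i : Int) + 1)
          omega
      · show max ans ((↑m : Int) - (↑i : Int) + 1) = ans0 ∨ ∃ q : Nat, i < q ∧ q ≤ m + 1 ∧
            pvStt nums q = pvStt nums i ∧
            max ans ((↑m : Int) - (↑i : Int) + 1) = (q : Int) - (↑i : Int)
        rcases le_total ((↑m : Int) - (↑i : Int) + 1) ans with hle | hge
        · rw [max_eq_left hle]
          rcases ih6 with h0 | ⟨q, a, b, c, dd⟩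
          · exact Or.inl h0
          · exact Or.inr ⟨q, a, by omega, c, dd⟩
        · rw [max_eq_right hge]
          exact Or.inr ⟨m + 1, by omega, le_rfl, hcond.mp hc, hval⟩
    · rw [if_neg hc]
      refine ⟨hx', hb', iha, ?_, ?_⟩
      · intro q hq1 hq2 hs
        by_cases hqm : q ≤ m
        · exact ih5 q hq1 hqm hs
        · have hq3 : q = m + 1 := by omega
          subst hq3
          exact absurd (hcond.mpr hs) hc
      · rcases ih6 with h0 | ⟨q, a, b, c, dd⟩
        · exact Or.inl h0
        · exact Or.inr ⟨q, a, by omega, c, dd⟩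

def pvBOuter (nums : List Int) (m : Nat) : Int :=
  (List.range m).foldl (fun ans (k : Nat) => (pvBInner nums k nums.length ans).2.2) 0

theorem pvBOuter_succ (nums : List Int) (m : Nat) :
    pvBOuter nums (m + 1) = (pvBInner nums m nums.length (pvBOuter nums m)).2.2 := by
  unfold pvBOuter
  rw [List.range_succ, List.foldl_append]
  rfl

theorem pvB_outer_inv (nums : List Int) : ∀ m : Nat, m ≤ nums.length →
    0 ≤ pvBOuter nums m ∧
    (∀ p q : Nat, p < q → q ≤ nums.length → p < m → pvStt nums p = pvStt nums q →
        (q : Int) - p ≤ pvBOuter nums m) ∧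
    (pvBOuter nums m = 0 ∨ ∃ p q : Nat, p < q ∧ q ≤ nums.length ∧
        pvStt nums p = pvStt nums q ∧ pvBOuter nums m = (q : Int) - p) := by
  intro m
  induction m with
  | zero =>
    intro _
    refine ⟨le_rfl, ?_, Or.inl rfl⟩
    intro p q _ _ hp _
    exact absurd hp (Nat.not_lt_zero p)
  | succ m ih =>
    intro hm
    obtain ⟨ih0, ih5, ih6⟩ := ih (by omega)
    obtain ⟨-, -, hK4, hK5, hK6⟩ :=
      pvB_inner_inv nums m nums.length (by omega) le_rfl (pvBOuter nums m)
    rw [pvBOuter_succ]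
    refine ⟨ih0.trans hK4, ?_, ?_⟩
    · intro p q hpq hq hp hs
      by_cases hpm : p < m
      · exact (ih5 p q hpq hq hpm hs).trans hK4
      · have hpm' : p = m := by omega
        subst hpm'
        exact hK5 q hpq hq hs.symm
    · rcases hK6 with h | ⟨q, hq1, hq2, hq3, hq4⟩
      · rw [h]
        rcases ih6 with h0 | ⟨p, q, a, b, c, dd⟩
        · exact Or.inl h0
        · exact Or.inr ⟨p, q, a, b, c, dd⟩
      · exact Or.inr ⟨m, q, hq1, hq2, hq3.symm, hq4⟩

theorem pvB_eq (nums : List Int) :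
    maxBalancedSubarray_alt nums = pvBOuter nums nums.length := by
  unfold maxBalancedSubarray_alt pvBOuter pvBInner
  simp only [PySem.List.len_eq]
  exact pv_foldl_cast nums.length _ 0

-- ===== VERDICT (by name: the statement is the Claim_ definition above) =====
theorem maxBalancedSubarray_spec : Claim_equal_maxBalancedSubarray := by
  intro nums _
  unfold Spec_maxBalancedSubarray
  rw [pvA_eq, pvB_eq]
  obtain ⟨-, -, -, hA0, hA1, hA2⟩ := pvA_inv nums nums.length le_rfl
  obtain ⟨hB0, hB1, hB2⟩ := pvB_outer_inv nums nums.length le_rfl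
  apply le_antisymm
  · rcases hA2 with h0 | ⟨p, q, hpq, hq, hs, he⟩
    · rw [h0]; exact hB0
    · rw [he]; exact hB1 p q hpq hq (lt_of_lt_of_le hpq hq) hs
  · rcases hB2 with h0 | ⟨p, q, hpq, hq, hs, he⟩
    · rw [h0]; exact hA0
    · rw [he]; exact hA1 p q hpq hq hs
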